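-- pv_equiv track=rewrite | github.com/pypi-data/pypi-mirror-375 | packages/apicrusher/apicrusher-2.0.0-py3-none-any.whl/apicrusher/core.py | _extract_key_context
-- ===== SOURCE A (Python) =====
-- from typing import Dict, Any, Optional, List, Union
--
-- def _extract_key_context(messages: List[Dict]) -> str:
--     """Extract key context points from conversation"""
--
--     key_points = []
--
--     # Get main topic from first user message
--     for msg in messages:
--         if msg.get('role') == 'user':
--             first_sentence = msg.get('content', '').split('.')[0]
--             key_points.append(f"Topic: {first_sentence[:100]}")
--             break
--
--     # Get any code language/framework mentioned
--     all_content = ' '.join(msg.get('content', '') for msg in messages)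
--
--     languages = ['python', 'javascript', 'typescript', 'java', 'go', 'rust', 'react', 'vue', 'django']
--     mentioned = [lang for lang in languages if lang in all_content.lower()]
--     if mentioned:
--         key_points.append(f"Tech: {', '.join(mentioned[:3])}")
--
--     # Get last decision/conclusion
--     for msg in reversed(messages):
--         if msg.get('role') == 'assistant':
--             content = msg.get('content', '')
--             if any(word in content.lower() for word in ['decided', 'solution', 'fixed', 'resolved']):
--                 last_sentence = content.split('.')[-1]
--                 key_points.append(f"Status: {last_sentence[:100]}")
--                 break
--
--     return '; '.join(key_points)
-- ===== SOURCE B (Python) =====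
-- def _extract_key_context(messages):
--     """Extract key context points from conversation (single forward pass)."""
--     topic = None
--     status = None
--     contents = []
--     for msg in messages:
--         content = msg.get('content', '')
--         contents.append(content)
--         role = msg.get('role')
--         if role == 'user' and topic is None:
--             topic = "Topic: " + content.split('.')[0][:100]
--         elif role == 'assistant':
--             low = content.lower()
--             if 'decided' in low or 'solution' in low or 'fixed' in low or 'resolved' in low:
--                 status = "Status: " + content.split('.')[-1][:100]
--     low_all = ' '.join(contents).lower()
--     mentioned = [lang for lang in ('python', 'javascript', 'typescript', 'java',
--                                    'go', 'rust', 'react', 'vue', 'django')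
--                  if lang in low_all][:3]
--     parts = []
--     if topic is not None:
--         parts.append(topic)
--     if mentioned:
--         parts.append("Tech: " + ', '.join(mentioned))
--     if status is not None:
--         parts.append(status)
--     return '; '.join(parts)
-- ===== Notes on version B (the rewrite author's own statement) =====
-- stated objective: alternative
-- what changed: Replaced A's three separate traversals (first-user scan, join over all messages, reversed first-match scan) by one forward pass accumulating topic (first-write), all contents, and status (last-write-wins), assembling the Topic/Tech/Status parts afterwards.
import Mathlib
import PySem

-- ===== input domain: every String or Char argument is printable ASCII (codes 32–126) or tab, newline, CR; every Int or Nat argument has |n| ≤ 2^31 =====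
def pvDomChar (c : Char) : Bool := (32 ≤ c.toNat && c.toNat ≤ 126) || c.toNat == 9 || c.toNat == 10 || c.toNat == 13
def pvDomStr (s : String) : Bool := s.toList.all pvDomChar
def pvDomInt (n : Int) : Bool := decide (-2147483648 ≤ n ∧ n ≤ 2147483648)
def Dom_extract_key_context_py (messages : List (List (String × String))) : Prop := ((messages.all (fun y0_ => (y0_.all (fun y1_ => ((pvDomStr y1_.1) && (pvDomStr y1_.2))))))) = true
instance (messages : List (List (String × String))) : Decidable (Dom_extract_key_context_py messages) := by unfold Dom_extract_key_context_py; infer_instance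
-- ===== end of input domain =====

-- B replaces A's three traversals (first-user scan, global join, reversed first-match scan)
-- by ONE forward pass with first-write topic and last-write-wins status; same return value.

-- shared dict-access helpers (Python's msg.get(k) / msg.get(k, dflt) on an association list, first match)
def pvGetOpt (m : List (String × String)) (k : String) : Option String :=
  (m.find? (fun p => p.1 == k)).map (·.2)

def pvGetD (m : List (String × String)) (k dflt : String) : String :=
  match pvGetOpt m k with
  | some v => v
  | none => dflt

-- shared candidate strings (identical expressions in both Pythons); split? with sep "." is always some
def pvSplitDot (content : String) : List String := (PySem.Str.split? content ".").getD []

def pvTopicStr (content : String) : String :=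
  "Topic: " ++ PySem.Str.slice ((pvSplitDot content).headD "") none (some 100)

def pvStatusStr (content : String) : String :=
  "Status: " ++ PySem.Str.slice ((pvSplitDot content).getLastD "") none (some 100)

-- ===== PORT A =====
-- first loop: first user message → ["Topic: …"] (break), else []
def aTopicLoop : List (List (String × String)) → List String
  | [] => []
  | msg :: rest =>
    if pvGetOpt msg "role" == some "user" then [pvTopicStr (pvGetD msg "content" "")]
    else aTopicLoop rest

-- last loop body, run over reversed(messages): first assistant message containing a keyword
def aStatusLoop : List (List (String × String)) → List String
  | [] => []
  | msg :: rest =>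
    if pvGetOpt msg "role" == some "assistant" then
      let content := pvGetD msg "content" ""
      if (["decided", "solution", "fixed", "resolved"]).any
          (fun w => PySem.Str.isIn w (PySem.Str.lower content)) then
        [pvStatusStr content]
      else aStatusLoop rest
    else aStatusLoop rest

def extract_key_context_py (messages : List (List (String × String))) : String :=
  let key_points1 := aTopicLoop messages
  let all_content := PySem.Str.join " " (messages.map (fun msg => pvGetD msg "content" ""))
  let languages := ["python", "javascript", "typescript", "java", "go", "rust", "react", "vue", "django"]
  let mentioned := languages.filter (fun lang => PySem.Str.isIn lang (PySem.Str.lower all_content))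
  let key_points2 :=
    if mentioned.isEmpty then key_points1
    else key_points1 ++ ["Tech: " ++ PySem.Str.join ", " (mentioned.take 3)]
  let key_points3 := key_points2 ++ aStatusLoop messages.reverse
  PySem.Str.join "; " key_points3

-- ===== PORT B =====
-- single forward pass: (topic?, contents so far, status?)
def bLoop : List (List (String × String)) → Option String × List String × Option String →
    Option String × List String × Option String
  | [], st => st
  | msg :: rest, (t, cs, s) =>
    let content := pvGetD msg "content" ""
    let cs' := cs ++ [content]
    let role := pvGetOpt msg "role"
    if role == some "user" && t.isNone then
      bLoop rest (some (pvTopicStr content), cs', s)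
    else if role == some "assistant" then
      let low := PySem.Str.lower content
      if PySem.Str.isIn "decided" low || PySem.Str.isIn "solution" low ||
         PySem.Str.isIn "fixed" low || PySem.Str.isIn "resolved" low then
        bLoop rest (t, cs', some (pvStatusStr content))
      else bLoop rest (t, cs', s)
    else bLoop rest (t, cs', s)

def extract_key_context_py_alt (messages : List (List (String × String))) : String :=
  let st := bLoop messages (none, [], none)
  let low_all := PySem.Str.lower (PySem.Str.join " " st.2.1)
  let mentioned := (["python", "javascript", "typescript", "java", "go", "rust", "react", "vue", "django"].filter
    (fun lang => PySem.Str.isIn lang low_all)).take 3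
  let parts :=
    (match st.1 with | some x => [x] | none => []) ++
    (if mentioned.isEmpty then [] else ["Tech: " ++ PySem.Str.join ", " mentioned]) ++
    (match st.2.2 with | some x => [x] | none => [])
  PySem.Str.join "; " parts

-- ===== PRECONDITION & SPEC =====
def Spec_extract_key_context_py (messages : List (List (String × String))) (out : String) : Prop := out = extract_key_context_py_alt messages
instance (messages : List (List (String × String))) (out : String) : Decidable (Spec_extract_key_context_py messages out) := by unfold Spec_extract_key_context_py; infer_instance

-- ===== CLAIM (what is proved, stated in full; the proofs are below) =====
def Claim_equal_extract_key_context_py : Prop := ∀ (messages : List (List (String × String))), Dom_extract_key_context_py messages → Spec_extract_key_context_py messages (extract_key_context_py messages)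

-- ===== LEMMAS AND PROOFS =====

-- contents accumulated by the B loop
theorem bLoop_contents (ms : List (List (String × String))) :
    ∀ t cs s, (bLoop ms (t, cs, s)).2.1 = cs ++ ms.map (fun msg => pvGetD msg "content" "") := by
  induction ms with
  | nil => intro t cs s; simp [bLoop]
  | cons m r ih =>
    intro t cs s
    simp only [bLoop]
    split
    · rw [ih]; simp
    · split
      · split
        · rw [ih]; simp
        · rw [ih]; simp
      · rw [ih]; simp

-- topic once set is preserved
theorem bLoop_topic_some (ms : List (List (String × String))) :
    ∀ x cs s, (bLoop ms (some x, cs, s)).1 = some x := by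
  induction ms with
  | nil => intro x cs s; simp [bLoop]
  | cons m r ih =>
    intro x cs s
    simp only [bLoop]
    split
    · simp_all
    · split
      · split <;> exact ih ..
      · exact ih ..

-- topic from none = A's first loop
theorem bLoop_topic (ms : List (List (String × String))) :
    ∀ cs s, (match (bLoop ms (none, cs, s)).1 with | some x => [x] | none => []) = aTopicLoop ms := by
  induction ms with
  | nil => intro cs s; simp [bLoop, aTopicLoop]
  | cons m r ih =>
    intro cs s
    by_cases hu : (pvGetOpt m "role" == some "user") = true
    · have hu' : (pvGetOpt m "role" == some "user" && (none : Option String).isNone) = true := by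
        simp [hu]
      simp only [bLoop, aTopicLoop]
      rw [if_pos hu', if_pos hu, bLoop_topic_some]
    · have hu' : ¬ (pvGetOpt m "role" == some "user" && (none : Option String).isNone) = true := by
        simp [hu]
      simp only [bLoop, aTopicLoop]
      rw [if_neg hu', if_neg hu]
      split_ifs <;> exact ih _ _

-- A's reversed status loop over an appended list: first hit in the front part wins
theorem aStatusLoop_append (xs ys : List (List (String × String))) :
    aStatusLoop (xs ++ ys) =
      match aStatusLoop xs with
      | [] => aStatusLoop ys
      | l => l := by
  induction xs with
  | nil => simp [aStatusLoop]
  | cons m r ih =>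
    simp only [List.cons_append, aStatusLoop]
    split
    · split
      · simp
      · rw [ih]
    · rw [ih]

-- the or-chain in B's Python equals A's any over the keyword list
theorem keyword_chain (low : String) :
    (PySem.Str.isIn "decided" low || PySem.Str.isIn "solution" low ||
     PySem.Str.isIn "fixed" low || PySem.Str.isIn "resolved" low) =
    (["decided", "solution", "fixed", "resolved"]).any (fun w => PySem.Str.isIn w low) := by
  simp [List.any, Bool.or_assoc]

-- status in the B loop: the head of A's reversed scan (last hit) wins over the carried state
theorem bLoop_status (ms : List (List (String × String))) :
    ∀ t cs s, (bLoop ms (t, cs, s)).2.2 =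
      (match aStatusLoop ms.reverse with | [] => s | x :: _ => some x) := by
  induction ms with
  | nil => intro t cs s; simp [bLoop, aStatusLoop]
  | cons m r ih =>
    intro t cs s
    rw [show (m :: r).reverse = r.reverse ++ [m] by simp, aStatusLoop_append]
    simp only [bLoop]
    by_cases hu : (pvGetOpt m "role" == some "user" && t.isNone) = true
    · have hna : (pvGetOpt m "role" == some "assistant") = false := by
        have h1 := ((Bool.and_eq_true _ _).mp hu).1
        simp_all
      have hm : aStatusLoop [m] = [] := by
        simp only [aStatusLoop]; rw [hna]; simp
      rw [if_pos hu, ih]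
      rcases h : aStatusLoop r.reverse with _ | ⟨x, l⟩ <;> simp [hm]
    · rw [if_neg hu]
      by_cases ha : (pvGetOpt m "role" == some "assistant") = true
      · rw [if_pos ha]
        by_cases hkw : (PySem.Str.isIn "decided" (PySem.Str.lower (pvGetD m "content" "")) ||
            PySem.Str.isIn "solution" (PySem.Str.lower (pvGetD m "content" "")) ||
            PySem.Str.isIn "fixed" (PySem.Str.lower (pvGetD m "content" "")) ||
            PySem.Str.isIn "resolved" (PySem.Str.lower (pvGetD m "content" ""))) = true
        · have hm : aStatusLoop [m] = [pvStatusStr (pvGetD m "content" "")] := by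
            rw [keyword_chain] at hkw
            simp only [aStatusLoop, ha, hkw]
            simp
          rw [if_pos hkw, ih]
          rcases h : aStatusLoop r.reverse with _ | ⟨x, l⟩ <;> simp [hm]
        · have hkw' : ((["decided", "solution", "fixed", "resolved"]).any
              (fun w => PySem.Str.isIn w (PySem.Str.lower (pvGetD m "content" "")))) = false := by
            rw [← keyword_chain]
            exact Bool.eq_false_iff.mpr hkw
          have hm : aStatusLoop [m] = [] := by
            simp only [aStatusLoop, ha, hkw']
            simp
          rw [if_neg hkw, ih]
          rcases h : aStatusLoop r.reverse with _ | ⟨x, l⟩ <;> simp [hm]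
      · rw [if_neg ha]
        have hm : aStatusLoop [m] = [] := by
          simp only [aStatusLoop]
          simp [ha]
        rw [ih]
        rcases h : aStatusLoop r.reverse with _ | ⟨x, l⟩ <;> simp [hm]

-- A's status loop produces at most one element
theorem aStatusLoop_len (ms : List (List (String × String))) :
    aStatusLoop ms = [] ∨ ∃ x, aStatusLoop ms = [x] := by
  induction ms with
  | nil => left; rfl
  | cons m r ih =>
    simp only [aStatusLoop]
    split
    · split
      · right; exact ⟨_, rfl⟩
      · exact ih
    · exact ih

-- ===== VERDICT (by name: the statement is the Claim_ definition above) =====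
theorem extract_key_context_py_spec : Claim_equal_extract_key_context_py := by
  intro messages _
  unfold Spec_extract_key_context_py
  simp only [extract_key_context_py, extract_key_context_py_alt]
  rw [bLoop_contents messages none [] none, bLoop_status messages none [] none,
    ← bLoop_topic messages [] none]
  simp only [List.nil_append]
  have htake : ∀ (l : List String), (l.take 3).isEmpty = l.isEmpty := by
    intro l; cases l <;> simp
  simp only [htake]
  cases ht : (bLoop messages (none, [], none)).1 <;>
    rcases aStatusLoop_len messages.reverse with hs | ⟨x, hs⟩ <;>
    rw [hs] <;> split_ifs <;> simp [hs]
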